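-- pv_equiv track=rewrite | github.com/brcrusoe72/manufacturing-analyst-pro | analyst/knowledge.py | _is_notable_quote
-- ===== SOURCE A (Python) =====
-- def _is_notable_quote(event: dict) -> bool:
--     """Identify supervisor observations worth preserving verbatim."""
--     text = event.get('issue', '') + ' ' + event.get('root_cause', '')
--     text = text.lower()
--     # Look for specific, insightful observations
--     indicators = [
--         "maintenance states", "maintenance said", "maintenance don't know",
--         "root cause wasn't located", "issue ongoing", "has been an issue",
--         "we don't have", "we're out of", "unable to resolve",
--         "multiple times", "throughout shift", "entire shift",
--         "no one came", "waiting for", "short mech", "short staff",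
--         "work around", "workaround",
--     ]
--     return any(ind in text for ind in indicators)
-- ===== SOURCE B (Python) =====
-- INDICATORS = [
--     "maintenance states", "maintenance said", "maintenance don't know",
--     "root cause wasn't located", "issue ongoing", "has been an issue",
--     "we don't have", "we're out of", "unable to resolve",
--     "multiple times", "throughout shift", "entire shift",
--     "no one came", "waiting for", "short mech", "short staff",
--     "work around", "workaround",
-- ]
--
-- def _is_notable_quote(event: dict) -> bool:
--     """Single left-to-right pass over the text: at each position, test whether
--     some indicator starts there (instead of one full substring scan per indicator)."""
--     text = (event.get('issue', '') + ' ' + event.get('root_cause', '')).lower()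
--     return any(
--         any(text[i:].startswith(ind) for ind in INDICATORS)
--         for i in range(len(text) + 1)
--     )
-- ===== Notes on version B (the rewrite author's own statement) =====
-- stated objective: alternative
-- what changed: A runs one full substring scan over the text per indicator; B makes a single left-to-right pass over the text and at each position tests whether any indicator is a prefix of the remaining suffix.
import Mathlib
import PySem

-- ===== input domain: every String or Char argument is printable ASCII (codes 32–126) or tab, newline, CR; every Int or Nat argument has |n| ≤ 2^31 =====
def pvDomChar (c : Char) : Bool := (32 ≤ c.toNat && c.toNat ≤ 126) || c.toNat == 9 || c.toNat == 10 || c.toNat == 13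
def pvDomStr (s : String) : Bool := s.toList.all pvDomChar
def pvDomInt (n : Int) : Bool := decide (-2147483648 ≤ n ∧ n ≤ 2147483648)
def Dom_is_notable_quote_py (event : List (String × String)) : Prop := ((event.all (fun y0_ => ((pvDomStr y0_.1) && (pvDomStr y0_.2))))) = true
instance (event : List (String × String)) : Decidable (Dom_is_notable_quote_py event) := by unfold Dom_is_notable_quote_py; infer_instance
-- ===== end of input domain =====

-- B replaces the per-indicator substring scans by a single left-to-right pass over the
-- text that tests at each position whether some indicator starts there (alternative).

-- ===== PORT A =====
def is_notable_quote_py (event : List (String × String)) : Bool :=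
  let d := PySem.Dict.mk event
  let text := PySem.Str.lower (d.getD "issue" "" ++ " " ++ d.getD "root_cause" "")
  let indicators : List String :=
    ["maintenance states", "maintenance said", "maintenance don't know",
     "root cause wasn't located", "issue ongoing", "has been an issue",
     "we don't have", "we're out of", "unable to resolve",
     "multiple times", "throughout shift", "entire shift",
     "no one came", "waiting for", "short mech", "short staff",
     "work around", "workaround"]
  indicators.any (fun ind => PySem.Str.isIn ind text)

-- ===== PORT B =====
-- module-level INDICATORS of Source B
def pvINDICATORS : List String :=
  ["maintenance states", "maintenance said", "maintenance don't know",
   "root cause wasn't located", "issue ongoing", "has been an issue",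
   "we don't have", "we're out of", "unable to resolve",
   "multiple times", "throughout shift", "entire shift",
   "no one came", "waiting for", "short mech", "short staff",
   "work around", "workaround"]

def is_notable_quote_py_alt (event : List (String × String)) : Bool :=
  let d := PySem.Dict.mk event
  let text := PySem.Str.lower (d.getD "issue" "" ++ " " ++ d.getD "root_cause" "")
  (PySem.List.pyRange 0 (PySem.Str.len text + 1) 1).any (fun i =>
    pvINDICATORS.any (fun ind =>
      PySem.Str.startswith (PySem.Str.slice text (some i) none) ind))

-- ===== PRECONDITION & SPEC =====
def Spec_is_notable_quote_py (event : List (String × String)) (out : Bool) : Prop := out = is_notable_quote_py_alt event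
instance (event : List (String × String)) (out : Bool) : Decidable (Spec_is_notable_quote_py event out) := by unfold Spec_is_notable_quote_py; infer_instance

-- ===== CLAIM (what is proved, stated in full; the proofs are below) =====
def Claim_equal_is_notable_quote_py : Prop := ∀ (event : List (String × String)), Dom_is_notable_quote_py event → Spec_is_notable_quote_py event (is_notable_quote_py event)

-- ===== LEMMAS AND PROOFS =====

-- any-substring = any position where some indicator is a prefix of the rest
lemma pv_scan_eq (inds : List String) (text : String) :
    inds.any (fun ind => PySem.Str.isIn ind text) =
    (PySem.List.pyRange 0 (PySem.Str.len text + 1) 1).any (fun i =>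
      inds.any (fun ind =>
        PySem.Str.startswith (PySem.Str.slice text (some i) none) ind)) := by
  rw [Bool.eq_iff_iff]
  simp only [List.any_eq_true, PySem.List.mem_pyRange_one, PySem.Str.len_eq,
    PySem.Str.startswith_eq, PySem.Str.toList_slice, PySem.Chars.slice_eq_listSlice,
    PySem.Str.isIn_eq]
  constructor
  · rintro ⟨ind, hmem, hin⟩
    rcases (PySem.Chars.exists_prefix_drop_iff_isIn ind.toList text.toList).2 hin with ⟨j, hj⟩
    by_cases hle : j ≤ text.toList.length
    · refine ⟨(j : Int), ⟨by positivity, by omega⟩, ind, hmem, ?_⟩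
      rw [PySem.List.slice_from _ (by positivity), PySem.Chars.startswith_iff]
      simpa using hj
    · have hnil : List.drop j text.toList = [] :=
        List.drop_eq_nil_of_le (by omega)
      have hind : ind.toList = [] := List.prefix_nil.mp (hnil ▸ hj)
      refine ⟨0, ⟨le_refl _, by positivity⟩, ind, hmem, ?_⟩
      rw [PySem.List.slice_from _ (by norm_num), PySem.Chars.startswith_iff, hind]
      exact List.nil_prefix
  · rintro ⟨i, ⟨hi0, _⟩, ind, hmem, hsw⟩
    rw [PySem.List.slice_from _ hi0, PySem.Chars.startswith_iff] at hsw
    exact ⟨ind, hmem, (PySem.Chars.exists_prefix_drop_iff_isIn _ _).1 ⟨i.toNat, hsw⟩⟩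

-- ===== VERDICT (by name: the statement is the Claim_ definition above) =====
theorem is_notable_quote_py_spec : Claim_equal_is_notable_quote_py := by
  intro event _
  unfold Spec_is_notable_quote_py is_notable_quote_py is_notable_quote_py_alt
  exact pv_scan_eq _ _
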